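-- pv_equiv track=rewrite | github.com/fanhenrique/tcc | utils.py | windows_range
-- ===== SOURCE A (Python) =====
-- def windows_range(windows):
--
-- 	windows_index_range = []
-- 	break0 = 0
-- 	for i in range(0, len(windows)):
-- 		if i+1 == len(windows):
-- 			break1 = i+1
-- 			windows_index_range.append((break0, break1))
-- 			break0 = break1
-- 		else:
-- 			if windows[i] != windows[i+1]:
-- 				break1 = i+1
-- 				windows_index_range.append((break0, break1))
-- 				break0 = break1
--
-- 	return windows_index_range
-- ===== SOURCE B (Python) =====
-- def windows_range(windows):
--     result = []
--     start = 0
--     n = len(windows)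
--     while start < n:
--         end = start + 1
--         while end < n and windows[end] == windows[start]:
--             end += 1
--         result.append((start, end))
--         start = end
--     return result
-- ===== Notes on version B (the rewrite author's own statement) =====
-- stated objective: alternative
-- what changed: Replaces A's single index-by-index loop with break0 boundary bookkeeping by a two-level while loop that jumps run by run: an inner while finds the end of the current run of equal values, the pair (start, end) is appended directly, and start advances to end.
import Mathlib
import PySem

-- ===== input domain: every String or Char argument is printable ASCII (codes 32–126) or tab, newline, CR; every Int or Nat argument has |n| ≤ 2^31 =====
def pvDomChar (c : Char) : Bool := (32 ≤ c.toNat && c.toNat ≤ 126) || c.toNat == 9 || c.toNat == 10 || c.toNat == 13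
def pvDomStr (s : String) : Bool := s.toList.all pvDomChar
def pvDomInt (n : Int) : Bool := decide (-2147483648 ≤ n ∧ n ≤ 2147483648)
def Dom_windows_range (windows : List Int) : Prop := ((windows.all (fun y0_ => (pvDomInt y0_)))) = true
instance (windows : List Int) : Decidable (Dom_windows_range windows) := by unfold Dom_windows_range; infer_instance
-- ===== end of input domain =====

-- B replaces A's index loop with break0 bookkeeping by a run-jumping two-level while loop (objective: alternative).


-- ===== PORT A =====
-- faithful transliteration: for i in range(0, len(windows)) with state (windows_index_range, break0)
def windows_range (windows : List Int) : List (Int × Int) :=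
  ((PySem.List.pyRange 0 (windows.length : Int) 1).foldl
    (fun (st : List (Int × Int) × Int) i =>
      if i + 1 = (windows.length : Int) then
        (st.1 ++ [(st.2, i + 1)], i + 1)
      else
        if PySem.List.pyGet? windows i ≠ PySem.List.pyGet? windows (i + 1) then
          (st.1 ++ [(st.2, i + 1)], i + 1)
        else st)
    ([], 0)).1

-- ===== PORT B =====
-- inner while: end = start+1; while end < n and windows[end] == windows[start]: end += 1
def pvRunEnd (w : List Int) (v : Int) (e : Nat) : Nat :=
  if h : e < w.length then
    if w[e] = v then pvRunEnd w v (e + 1) else e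
  else e
termination_by w.length - e

theorem pvRunEnd_ge (w : List Int) (v : Int) (e : Nat) : e ≤ pvRunEnd w v e := by
  unfold pvRunEnd
  split
  · split
    · exact le_trans (Nat.le_succ e) (pvRunEnd_ge w v (e + 1))
    · exact le_refl e
  · exact le_refl e
termination_by w.length - e

-- outer while: while start < n: find run end, append (start, end), start = end
def pvScanRuns (w : List Int) (start : Nat) : List (Int × Int) :=
  if h : start < w.length then
    let e := pvRunEnd w w[start] (start + 1)
    ((start : Int), (e : Int)) :: pvScanRuns w e
  else []
termination_by w.length - start
decreasing_by
  have := pvRunEnd_ge w w[start] (start + 1)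
  omega

def windows_range_alt (windows : List Int) : List (Int × Int) :=
  pvScanRuns windows 0

-- ===== PRECONDITION & SPEC =====
def Spec_windows_range (windows : List Int) (out : List (Int × Int)) : Prop := out = windows_range_alt windows
instance (windows : List Int) (out : List (Int × Int)) : Decidable (Spec_windows_range windows out) := by unfold Spec_windows_range; infer_instance

-- ===== CLAIM (what is proved, stated in full; the proofs are below) =====
def Claim_equal_windows_range : Prop := ∀ (windows : List Int), Dom_windows_range windows → Spec_windows_range windows (windows_range windows)

-- ===== LEMMAS AND PROOFS =====

-- A's loop body, named for the proofs
def pvStepA (w : List Int) (st : List (Int × Int) × Int) (i : Int) : List (Int × Int) × Int :=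
  if i + 1 = (w.length : Int) then
    (st.1 ++ [(st.2, i + 1)], i + 1)
  else
    if PySem.List.pyGet? w i ≠ PySem.List.pyGet? w (i + 1) then
      (st.1 ++ [(st.2, i + 1)], i + 1)
    else st

theorem pvRunEnd_le (w : List Int) (v : Int) (e : Nat) (h : e ≤ w.length) :
    pvRunEnd w v e ≤ w.length := by
  unfold pvRunEnd
  split
  · split
    · exact pvRunEnd_le w v (e + 1) (by omega)
    · exact h
  · exact h
termination_by w.length - e

theorem pvRunEnd_run (w : List Int) (v : Int) (e : Nat) (i : Nat)
    (h1 : e ≤ i) (h2 : i < pvRunEnd w v e) : w[i]? = some v := by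
  unfold pvRunEnd at h2
  split at h2
  · next he =>
    split at h2
    · next hv =>
      rcases Nat.eq_or_lt_of_le h1 with rfl | hlt
      · simp [List.getElem?_eq_getElem he, hv]
      · exact pvRunEnd_run w v (e + 1) i hlt h2
    · omega
  · omega
termination_by w.length - e

theorem pvRunEnd_stop (w : List Int) (v : Int) (e : Nat)
    (h : pvRunEnd w v e < w.length) : ¬ w[pvRunEnd w v e]? = some v := by
  unfold pvRunEnd at h ⊢
  by_cases he : e < w.length
  · simp only [dif_pos he] at h ⊢
    by_cases hv : w[e] = v
    · simp only [if_pos hv] at h ⊢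
      exact pvRunEnd_stop w v (e + 1) h
    · simp only [if_neg hv] at h ⊢
      simp [List.getElem?_eq_getElem he]
      exact hv
  · simp only [dif_neg he] at h ⊢
    intro hc
    exact he (by simpa using (List.getElem?_eq_some_iff.mp hc).1)
termination_by w.length - e

theorem pvFoldl_fixed {α β : Type} (f : α → β → α) (a : α) (l : List β)
    (h : ∀ b ∈ l, f a b = a) : l.foldl f a = a := by
  induction l with
  | nil => rfl
  | cons x xs ih =>
    rw [List.foldl_cons, h x (List.mem_cons_self), ih]
    intro b hb; exact h b (List.mem_cons_of_mem _ hb)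

-- A's fold from a run boundary j with break0 = j produces exactly B's runs of the suffix
theorem pvFoldA (w : List Int) (j : Nat) (hj : j ≤ w.length) (acc : List (Int × Int)) :
    ((PySem.List.pyRange (j : Int) (w.length : Int) 1).foldl (pvStepA w) (acc, (j : Int))).1
      = acc ++ pvScanRuns w j := by
  rcases Nat.eq_or_lt_of_le hj with rfl | hlt
  · rw [PySem.List.pyRange_one_eq_nil (le_refl _)]
    rw [pvScanRuns, dif_neg (lt_irrefl _), List.append_nil]
    rfl
  · set e := pvRunEnd w (w[j]'hlt) (j + 1) with he
    have hge : j + 1 ≤ e := pvRunEnd_ge w _ (j + 1)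
    have hle : e ≤ w.length := pvRunEnd_le w _ (j + 1) (by omega)
    -- the run value is constant on [j, e)
    have hconst : ∀ i : Nat, j ≤ i → i < e → w[i]? = some (w[j]'hlt) := by
      intro i h1 h2
      rcases Nat.eq_or_lt_of_le h1 with rfl | hlt2
      · rw [List.getElem?_eq_getElem hlt]
      · exact pvRunEnd_run w (w[j]'hlt) (j + 1) i hlt2 (he ▸ h2)
    -- split the index range at e-1
    have hsplit : PySem.List.pyRange (j : Int) (w.length : Int) 1
        = PySem.List.pyRange (j : Int) ((e : Int) - 1) 1
          ++ ((e : Int) - 1) :: PySem.List.pyRange (e : Int) (w.length : Int) 1 := by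
      rw [PySem.List.pyRange_one_append (j : Int) ((e : Int) - 1) (w.length : Int)
            (by omega) (by omega)]
      congr 1
      have : ((e : Int) - 1) + 1 = (e : Int) := by ring
      rw [PySem.List.pyRange_one_cons (by omega), this]
    rw [hsplit, List.foldl_append]
    -- the indices j .. e-2 leave the state unchanged
    have hfix : (PySem.List.pyRange (j : Int) ((e : Int) - 1) 1).foldl (pvStepA w)
        (acc, (j : Int)) = (acc, (j : Int)) := by
      apply pvFoldl_fixed
      intro i hi
      rw [PySem.List.mem_pyRange_one] at hi
      have h0 : (0:Int) ≤ i := by omega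
      have hiN : i.toNat < e - 1 := by omega
      have hiJ : j ≤ i.toNat := by omega
      unfold pvStepA
      have hne : ¬ (i + 1 = (w.length : Int)) := by omega
      rw [if_neg hne]
      have g1 : PySem.List.pyGet? w i = some (w[j]'hlt) := by
        rw [PySem.List.pyGet?_of_nonneg w h0]
        exact hconst i.toNat hiJ (by omega)
      have g2 : PySem.List.pyGet? w (i + 1) = some (w[j]'hlt) := by
        rw [PySem.List.pyGet?_of_nonneg w (by omega)]
        have : (i + 1).toNat = i.toNat + 1 := by omega
        rw [this]
        exact hconst (i.toNat + 1) (by omega) (by omega)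
      rw [g1, g2, if_neg (not_not_intro rfl)]
    rw [hfix]
    -- index e-1 appends the run (j, e)
    have hstep : pvStepA w (acc, (j : Int)) ((e : Int) - 1)
        = (acc ++ [((j : Int), (e : Int))], (e : Int)) := by
      unfold pvStepA
      have harith : ((e : Int) - 1) + 1 = (e : Int) := by ring
      rcases Nat.eq_or_lt_of_le hle with heq | hltE
      · rw [if_pos (by omega)]
        simp [harith]
      · rw [if_neg (by omega)]
        have g1 : PySem.List.pyGet? w ((e : Int) - 1) = some (w[j]'hlt) := by
          rw [PySem.List.pyGet?_of_nonneg w (by omega)]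
          have : ((e : Int) - 1).toNat = e - 1 := by omega
          rw [this]
          exact hconst (e - 1) (by omega) (by omega)
        have g2 : ¬ PySem.List.pyGet? w ((e : Int) - 1 + 1) = some (w[j]'hlt) := by
          rw [harith, PySem.List.pyGet?_of_nonneg w (by omega)]
          have : (e : Int).toNat = e := by omega
          rw [this]
          exact pvRunEnd_stop w _ (j + 1) (he ▸ hltE)
        rw [if_pos (by rw [g1]; exact fun hc => g2 (hc ▸ g1 ▸ rfl))]
        simp [harith]
    rw [List.foldl_cons, hstep]
    have hrec := pvFoldA w e hle (acc ++ [((j : Int), (e : Int))])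
    rw [hrec]
    conv_rhs => rw [pvScanRuns]
    simp only [dif_pos hlt, ← he]
    rw [List.append_assoc, List.singleton_append]
termination_by w.length - j
decreasing_by omega

-- ===== VERDICT (by name: the statement is the Claim_ definition above) =====
theorem windows_range_spec : Claim_equal_windows_range := by
  intro w _
  show windows_range w = windows_range_alt w
  have h := pvFoldA w 0 (Nat.zero_le _) []
  rw [show windows_range w
      = ((PySem.List.pyRange 0 (w.length : Int) 1).foldl (pvStepA w) ([], 0)).1 from rfl]
  rw [show ((0:Nat):Int) = (0:Int) from rfl] at h
  rw [h, List.nil_append]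
  rfl
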